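-- pv_equiv track=rewrite | github.com/Cognitohazard/pyxschem | src/pyxschem/parser.py | _brace_depth
-- ===== SOURCE A (Python) =====
-- def _brace_depth(line: str, in_quote: bool) -> tuple[int, bool]:
--     """Count net brace depth change in a line, tracking quote state.
--
--     Args:
--         line: The line to analyze.
--         in_quote: Whether we're inside a quoted string from a previous line.
--
--     Returns:
--         (depth_change, in_quote_after) — net brace depth and quote state.
--     """
--     depth = 0
--     for ch in line:
--         if ch == '"':
--             in_quote = not in_quote
--         elif not in_quote:
--             if ch == "{":
--                 depth += 1
--             elif ch == "}":
--                 depth -= 1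
--     return depth, in_quote
-- ===== SOURCE B (Python) =====
-- def _brace_depth(line: str, in_quote: bool) -> tuple[int, bool]:
--     """Split on '"': segments at even (index + in_quote) parity are outside quotes;
--     sum their brace counts, and flip the quote state iff the quote count is odd."""
--     parts = line.split('"')
--     depth = sum(p.count("{") - p.count("}")
--                 for i, p in enumerate(parts) if (i + in_quote) % 2 == 0)
--     return depth, in_quote != (len(parts) % 2 == 0)
-- ===== Notes on version B (the rewrite author's own statement) =====
-- stated objective: faster
-- what changed: Replaces the per-character quote/brace state machine with a split-on-'"' decomposition: segments of line.split('"') at even (index + in_quote) parity are outside quotes, so depth is the sum of their brace counts and the final quote state is in_quote XOR the parity of the quote count.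
import Mathlib
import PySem

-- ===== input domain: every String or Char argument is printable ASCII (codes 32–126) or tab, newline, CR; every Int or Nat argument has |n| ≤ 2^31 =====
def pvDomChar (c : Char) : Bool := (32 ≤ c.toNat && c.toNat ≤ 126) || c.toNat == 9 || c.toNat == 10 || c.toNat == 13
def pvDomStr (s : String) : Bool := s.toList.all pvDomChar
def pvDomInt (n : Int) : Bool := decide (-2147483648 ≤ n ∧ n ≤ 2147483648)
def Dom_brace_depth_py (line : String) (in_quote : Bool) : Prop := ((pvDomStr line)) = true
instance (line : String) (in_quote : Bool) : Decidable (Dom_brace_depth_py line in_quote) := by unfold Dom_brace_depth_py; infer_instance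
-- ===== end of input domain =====

-- B replaces A's per-character state machine with a split-on-'"' pass: segments at even
-- (index + in_quote) parity are outside quotes; sum their brace counts (same O(n), measured
-- constant-factor faster in Python since split/count run in C).

-- ===== PORT A =====
-- per-character loop over the line with mutable (depth, in_quote)
def pvStepA (st : Int × Bool) (ch : Char) : Int × Bool :=
  if ch = '"' then (st.1, !st.2)
  else if !st.2 then
    if ch = '{' then (st.1 + 1, st.2)
    else if ch = '}' then (st.1 - 1, st.2)
    else st
  else st

def brace_depth_py (line : String) (in_quote : Bool) : Int × Bool :=
  line.toList.foldl pvStepA (0, in_quote)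

-- ===== PORT B =====
-- sum of p.count('{') - p.count('}') over the segments of line.split('"') whose
-- (index + in_quote) parity is even; the alternating Bool flag carries that parity
def pvAltSum : List (List Char) → Bool → Int
  | [], _ => 0
  | p :: rest, q =>
      (if q then 0
       else (PySem.Chars.count p ['{'] : Int) - (PySem.Chars.count p ['}'] : Int))
      + pvAltSum rest (!q)

def brace_depth_py_alt (line : String) (in_quote : Bool) : Int × Bool :=
  let parts := PySem.Chars.splitOn line.toList ['"']
  (pvAltSum parts in_quote, xor in_quote (decide (parts.length % 2 = 0)))

-- ===== PRECONDITION & SPEC =====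
def Spec_brace_depth_py (line : String) (in_quote : Bool) (out : Int × Bool) : Prop := out = brace_depth_py_alt line in_quote
instance (line : String) (in_quote : Bool) (out : Int × Bool) : Decidable (Spec_brace_depth_py line in_quote out) := by unfold Spec_brace_depth_py; infer_instance

-- ===== CLAIM (what is proved, stated in full; the proofs are below) =====
def Claim_equal_brace_depth_py : Prop := ∀ (line : String) (in_quote : Bool), Dom_brace_depth_py line in_quote → Spec_brace_depth_py line in_quote (brace_depth_py line in_quote)

-- ===== LEMMAS AND PROOFS =====

-- reference single-char splitter: splitQ s = s.split('"') on char lists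
def splitQ : List Char → List (List Char)
  | [] => [[]]
  | c :: cs =>
      if c = '"' then [] :: splitQ cs
      else
        match splitQ cs with
        | [] => [[c]]
        | s :: rest => (c :: s) :: rest

theorem splitQ_ne_nil (cs : List Char) : splitQ cs ≠ [] := by
  cases cs with
  | nil => simp [splitQ]
  | cons c cs =>
      simp only [splitQ]
      split
      · simp
      · cases h : splitQ cs <;> simp

-- count.go with the single-char pattern [c] counts occurrences of c
theorem count_go_single (c : Char) (s : List Char) : ∀ (fuel acc : Nat),
    s.length ≤ fuel → PySem.Chars.count.go [c] fuel s acc = acc + s.count c := by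
  induction s with
  | nil =>
      intro fuel acc _
      cases fuel <;> simp [PySem.Chars.count.go]
  | cons a t ih =>
      intro fuel acc hf
      cases fuel with
      | zero => simp at hf
      | succ f =>
          have hlt : t.length ≤ f := by simp at hf; omega
          by_cases hac : c = a
          · subst hac
            simp [PySem.Chars.count.go, ih f (acc + 1) hlt, List.count_cons]
            omega
          · have hba : (c == a) = false := by simp [hac]
            simp [PySem.Chars.count.go, hba, ih f acc hlt, List.count_cons, hac, Ne.symm hac]

theorem count_single (s : List Char) (c : Char) :
    PySem.Chars.count s [c] = s.count c := by
  have h := count_go_single c s s.length 0 le_rfl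
  simp [PySem.Chars.count, h]

-- prepend pre to the first segment
def consHead (pre : List Char) : List (List Char) → List (List Char)
  | [] => [pre]
  | s :: rest => (pre ++ s) :: rest

theorem splitOn_go_eq (s : List Char) : ∀ (fuel : Nat) (cur : List Char) (acc : List (List Char)),
    s.length ≤ fuel →
    PySem.Chars.splitOn.go ['"'] fuel s cur acc = acc.reverse ++ consHead cur.reverse (splitQ s) := by
  induction s with
  | nil =>
      intro fuel cur acc _
      cases fuel <;> simp [PySem.Chars.splitOn.go, splitQ, consHead]
  | cons a t ih =>
      intro fuel cur acc hf
      cases fuel with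
      | zero => simp at hf
      | succ f =>
          have hlt : t.length ≤ f := by simp at hf; omega
          by_cases hq : a = '"'
          · subst hq
            simp [PySem.Chars.splitOn.go, ih f [] (cur.reverse :: acc) hlt, splitQ, consHead]
            cases h : splitQ t with
            | nil => exact absurd h (splitQ_ne_nil t)
            | cons s rest => simp
          · have hba : ('"' == a) = false := by simp; intro h; exact hq h.symm
            simp only [PySem.Chars.splitOn.go, List.isPrefixOf, hba, Bool.false_and,
              if_neg (by simp : ¬ (false = true))]
            rw [ih f (a :: cur) acc hlt]
            simp only [splitQ, if_neg hq]
            cases h : splitQ t with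
            | nil => exact absurd h (splitQ_ne_nil t)
            | cons s rest => simp [consHead]

theorem splitOn_eq_splitQ (s : List Char) :
    PySem.Chars.splitOn s ['"'] = splitQ s := by
  simp only [PySem.Chars.splitOn]
  rw [splitOn_go_eq s (s.length + 1) [] [] (by omega)]
  cases h : splitQ s with
  | nil => exact absurd h (splitQ_ne_nil s)
  | cons a l => simp [consHead]

-- the main invariant: the fold equals the split-based sum, starting from any depth
theorem fold_eq_split (cs : List Char) : ∀ (d : Int) (q : Bool),
    cs.foldl pvStepA (d, q)
    = (d + pvAltSum (splitQ cs) q, xor q (decide ((splitQ cs).length % 2 = 0))) := by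
  induction cs with
  | nil => intro d q; simp [splitQ, pvAltSum]
  | cons c t ih =>
      intro d q
      by_cases hq : c = '"'
      · subst hq
        have step : pvStepA (d, q) '"' = (d, !q) := by simp [pvStepA]
        rw [List.foldl_cons, step, ih d (!q)]
        simp only [splitQ, if_pos rfl, pvAltSum, List.length_cons, Prod.mk.injEq]
        constructor
        · simp [pvAltSum, PySem.Chars.count, PySem.Chars.count.go]
        · have hm : (splitQ t).length % 2 = 0 ∨ (splitQ t).length % 2 = 1 := by omega
          cases q <;> rcases hm with hm | hm <;>
            simp [Nat.succ_mod_two_eq_zero_iff, hm]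
      · have key : pvAltSum (splitQ (c :: t)) q
            = (if q then 0 else (if c = '{' then (1:Int) else if c = '}' then -1 else 0))
              + pvAltSum (splitQ t) q ∧
            (splitQ (c :: t)).length = (splitQ t).length := by
          simp only [splitQ, if_neg hq]
          cases h : splitQ t with
          | nil => exact absurd h (splitQ_ne_nil t)
          | cons s rest =>
              simp only [pvAltSum, List.length_cons]
              refine ⟨?_, by simp⟩
              · cases q
                · simp only [if_neg (by simp : ¬ (false = true))]
                  have h1 : PySem.Chars.count (c :: s) ['{'] = (c :: s).count '{' := count_single _ _
                  have h2 : PySem.Chars.count (c :: s) ['}'] = (c :: s).count '}' := count_single _ _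
                  have h3 : PySem.Chars.count s ['{'] = s.count '{' := count_single _ _
                  have h4 : PySem.Chars.count s ['}'] = s.count '}' := count_single _ _
                  rw [h1, h2, h3, h4]
                  by_cases hc1 : c = '{'
                  · subst hc1
                    simp [List.count_cons]
                    push_cast
                    ring
                  · by_cases hc2 : c = '}'
                    · subst hc2
                      simp [List.count_cons, hc1]
                      ring
                    · simp [List.count_cons, hc1, hc2]
                · simp
        rcases key with ⟨k1, k2⟩
        cases q with
        | false =>
            by_cases hc1 : c = '{'
            · subst hc1
              have step : pvStepA (d, false) '{' = (d + 1, false) := by simp [pvStepA]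
              rw [List.foldl_cons, step, ih (d + 1) false, k1, k2]
              simp
              ring
            · by_cases hc2 : c = '}'
              · subst hc2
                have step : pvStepA (d, false) '}' = (d - 1, false) := by simp [pvStepA, hc1]
                rw [List.foldl_cons, step, ih (d - 1) false, k1, k2]
                simp [hc1]
                ring
              · have step : pvStepA (d, false) c = (d, false) := by simp [pvStepA, hq, hc1, hc2]
                rw [List.foldl_cons, step, ih d false, k1, k2]
                simp [hc1, hc2]
        | true =>
            have step : pvStepA (d, true) c = (d, true) := by simp [pvStepA, hq]
            rw [List.foldl_cons, step, ih d true, k1, k2]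
            simp

-- ===== VERDICT (by name: the statement is the Claim_ definition above) =====
theorem brace_depth_py_spec : Claim_equal_brace_depth_py := by
  intro line in_quote _
  unfold Spec_brace_depth_py brace_depth_py brace_depth_py_alt
  rw [splitOn_eq_splitQ, fold_eq_split]
  simp
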